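-- pv_equiv track=rewrite | github.com/Serotonin-events/Serotonin-Tournament-Software | app.py | create_serpentine_matches
-- ===== SOURCE A (Python) =====
-- import math
--
-- def create_serpentine_matches(players):
--     num_players = len(players)
--     if num_players == 0: return []
--     num_matches = math.ceil(num_players / 4.0)
--     padded_players = players + [{"trackmania_id": "BYE", "trackmania_name": "BYE", "display_bracket_name": "BYE", "seed": None}] * (int(num_matches) * 4 - num_players)
--     matches = []
--     for i in range(int(num_matches)):
--         match_players = [
--             padded_players[i],
--             padded_players[int(num_matches) * 2 - 1 - i],
--             padded_players[int(num_matches) * 2 + i],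
--             padded_players[int(num_matches) * 4 - 1 - i]
--         ]
--         matches.append([p for p in match_players if p['trackmania_id'] != "BYE"])
--     return matches
-- ===== SOURCE B (Python) =====
-- def create_serpentine_matches(players):
--     n = len(players)
--     if n == 0:
--         return []
--     m = (n + 3) // 4
--     bye = {"trackmania_id": "BYE", "trackmania_name": "BYE", "display_bracket_name": "BYE", "seed": None}
--     # Pre-fill an m x 4 table with BYEs, then scatter each player into its
--     # (row, column) by the serpentine rule: column q = j // m goes top-down
--     # when even and bottom-up when odd.
--     table = [[bye] * 4 for _ in range(m)]
--     for j, p in enumerate(players):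
--         q, r = divmod(j, m)
--         row = r if q % 2 == 0 else m - 1 - r
--         table[row][q] = p
--     return [[p for p in row if p['trackmania_id'] != "BYE"] for row in table]
-- ===== Notes on version B (the rewrite author's own statement) =====
-- stated objective: alternative
-- what changed: B inverts A's gather: it preallocates an m x 4 table of BYE placeholders and makes one scatter pass over the players, computing each player's (row, column) from its index with divmod and the boustrophedon rule (even columns top-down, odd columns bottom-up), then filters BYEs per row; A instead builds each match by four index lookups into a padded list.
import Mathlib
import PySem

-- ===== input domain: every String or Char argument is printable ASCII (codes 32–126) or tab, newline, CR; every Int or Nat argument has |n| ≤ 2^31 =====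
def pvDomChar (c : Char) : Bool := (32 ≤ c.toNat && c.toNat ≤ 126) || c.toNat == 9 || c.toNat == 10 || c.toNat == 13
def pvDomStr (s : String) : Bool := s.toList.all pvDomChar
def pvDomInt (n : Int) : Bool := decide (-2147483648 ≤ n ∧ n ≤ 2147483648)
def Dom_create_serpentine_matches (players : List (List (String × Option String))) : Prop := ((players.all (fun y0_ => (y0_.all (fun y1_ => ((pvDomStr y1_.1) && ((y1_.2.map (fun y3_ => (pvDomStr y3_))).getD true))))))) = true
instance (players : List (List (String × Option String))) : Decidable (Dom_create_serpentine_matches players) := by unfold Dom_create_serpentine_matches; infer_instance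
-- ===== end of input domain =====

-- B scatters each player into a preallocated m×4 BYE table by divmod (serpentine rule),
-- instead of A's per-match gather by index arithmetic; return values are proved equal.

-- ===== PORT A =====
-- the BYE placeholder dict (shared literal of both Python versions)
def pvBye : List (String × Option String) :=
  [("trackmania_id", some "BYE"), ("trackmania_name", some "BYE"),
   ("display_bracket_name", some "BYE"), ("seed", none)]

-- p['trackmania_id'] != "BYE" (first-match assoc lookup; the key exists under Pre_,
-- and a None value compares unequal to "BYE", hence the comparison with `some (some "BYE")`)
def pvKeep (p : List (String × Option String)) : Bool :=
  !(p.lookup "trackmania_id" == some (some "BYE"))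

def create_serpentine_matches (players : List (List (String × Option String))) : List (List (List (String × Option String))) :=
  let n : Int := players.length
  if n = 0 then []
  else
    -- math.ceil(num_players / 4.0): exact as an integer ceiling for any list length
    let m : Int := PySem.Int.floordiv (n + 3) 4
    let padded := players ++ List.replicate (m * 4 - n).toNat pvBye
    -- the four indices are always in range, so the pyGetD default is never used
    (PySem.List.pyRange 0 m 1).foldl
      (fun acc i =>
        let mp := [PySem.List.pyGetD padded i pvBye,
                   PySem.List.pyGetD padded (m * 2 - 1 - i) pvBye,
                   PySem.List.pyGetD padded (m * 2 + i) pvBye,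
                   PySem.List.pyGetD padded (m * 4 - 1 - i) pvBye]
        acc ++ [mp.filter pvKeep]) []

-- ===== PORT B =====
-- the 'for j, p in enumerate(players)' loop of Source B: place player p (index j) at
-- table[row][q]; row and q are provably nonnegative and in range here, so .toNat is
-- exact for Python's nonnegative in-range list assignment
def pvScatterLoop (m : Int) :
    List (List (String × Option String)) → Int → List (List (List (String × Option String))) →
    List (List (List (String × Option String)))
  | [], _, t => t
  | p :: rest, j, t =>
    let q := PySem.Int.floordiv j m
    let r := PySem.Int.mod j m
    let row := if PySem.Int.mod q 2 = 0 then r else m - 1 - r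
    pvScatterLoop m rest (j + 1) (t.set row.toNat ((t.getD row.toNat []).set q.toNat p))

def create_serpentine_matches_alt (players : List (List (String × Option String))) : List (List (List (String × Option String))) :=
  let n : Int := players.length
  if n = 0 then []
  else
    let m : Int := PySem.Int.floordiv (n + 3) 4
    -- table = [[bye]*4 for _ in range(m)]
    let table0 := (PySem.List.pyRange 0 m 1).map (fun _ => [pvBye, pvBye, pvBye, pvBye])
    let table := pvScatterLoop m players 0 table0
    table.map (fun row => row.filter pvKeep)

-- ===== PRECONDITION & SPEC =====
-- Pre_ excludes exactly the inputs where a player dict lacks the 'trackmania_id' key,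
-- on which the Python A raises KeyError (and so does B).
def Pre_create_serpentine_matches (players : List (List (String × Option String))) : Prop :=
  (players.all (fun p => (p.lookup "trackmania_id").isSome)) = true
instance (players : List (List (String × Option String))) : Decidable (Pre_create_serpentine_matches players) := by unfold Pre_create_serpentine_matches; infer_instance

def pvWitness_create_serpentine_matches : (List (List (String × Option String))) :=
  [[("trackmania_id", some "a"), ("seed", some "1")],
   [("trackmania_id", some "b"), ("seed", none)]]

def Spec_create_serpentine_matches (players : List (List (String × Option String))) (out : List (List (List (String × Option String)))) : Prop := out = create_serpentine_matches_alt players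
instance (players : List (List (String × Option String))) (out : List (List (List (String × Option String)))) : Decidable (Spec_create_serpentine_matches players out) := by unfold Spec_create_serpentine_matches; infer_instance

-- ===== CLAIM (what is proved, stated in full; the proofs are below) =====
def Claim_equal_create_serpentine_matches : Prop := ∀ (players : List (List (String × Option String))), Dom_create_serpentine_matches players → Pre_create_serpentine_matches players → Spec_create_serpentine_matches players (create_serpentine_matches players)

-- ===== LEMMAS AND PROOFS =====

-- the table, abstracted: row i holds the contents of global positions i, 2M-1-i, 2M+i, 4M-1-i
def pvTbl (M : Nat) (G : Nat → List (String × Option String)) :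
    List (List (List (String × Option String))) :=
  (List.range M).map (fun i => [G i, G (2*M-1-i), G (2*M+i), G (4*M-1-i)])

-- Function.update facts in rewrite-friendly form
theorem pvUpdEq (G : Nat → List (String × Option String)) (k : Nat)
    (p : List (String × Option String)) (j : Nat) (h : j = k) :
    Function.update G k p j = p := by rw [h]; simp

theorem pvUpdNe (G : Nat → List (String × Option String)) (k : Nat)
    (p : List (String × Option String)) (j : Nat) (h : j ≠ k) :
    Function.update G k p j = G j := by rw [Function.update_apply, if_neg h]

-- setting an element of a map-over-range, as a map
theorem pvMapRangeSet {α : Type} (M : Nat) (f : Nat → α) (r : Nat) (_hr : r < M) (v : α) :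
    ((List.range M).map f).set r v
      = (List.range M).map (fun i => if i = r then v else f i) := by
  apply List.ext_getElem
  · simp
  · intro i h1 h2
    have hi : i < M := by simpa using h2
    simp only [List.getElem_set, List.getElem_map, List.getElem_range]
    by_cases h : i = r
    · rw [if_pos h.symm, if_pos h]
    · rw [if_neg (fun hh => h hh.symm), if_neg h]

-- one scatter step updates exactly global position k of the abstract table
theorem pvStep (M : Nat) (hM : 0 < M) (G : Nat → List (String × Option String))
    (k : Nat) (hk : k < 4*M) (p : List (String × Option String)) :
    ((pvTbl M G).set (if (k / M) % 2 = 0 then k % M else M - 1 - k % M)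
      (((pvTbl M G).getD (if (k / M) % 2 = 0 then k % M else M - 1 - k % M) []).set (k / M) p))
    = pvTbl M (Function.update G k p) := by
  obtain ⟨q, r, hq, hr, hq4, hrm, hkd⟩ :
      ∃ q r, k / M = q ∧ k % M = r ∧ q < 4 ∧ r < M ∧ M*q + r = k :=
    ⟨k/M, k%M, rfl, rfl, Nat.div_lt_of_lt_mul (by omega), Nat.mod_lt _ hM,
      Nat.div_add_mod k M⟩
  rw [hq, hr]
  have hrow : (if q % 2 = 0 then r else M - 1 - r) < M := by split <;> omega
  have hgetD : (pvTbl M G).getD (if q % 2 = 0 then r else M - 1 - r) []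
      = (fun i => [G i, G (2*M-1-i), G (2*M+i), G (4*M-1-i)])
          (if q % 2 = 0 then r else M - 1 - r) := by
    rw [List.getD_eq_getElem _ _ (by simpa [pvTbl] using hrow)]
    simp [pvTbl]
  rw [hgetD]
  unfold pvTbl
  rw [pvMapRangeSet _ _ _ (by simpa [pvTbl] using hrow)]
  have hq4' : q = 0 ∨ q = 1 ∨ q = 2 ∨ q = 3 := by omega
  apply List.map_congr_left
  intro i hi'
  have hi : i < M := List.mem_range.mp hi'
  rcases hq4' with h|h|h|h <;> subst h <;> norm_num
  · -- q = 0: row = r = k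
    split
    · rename_i hri
      rw [pvUpdEq G k p i (by omega), pvUpdNe G k p (2*M-1-i) (by omega),
          pvUpdNe G k p (2*M+i) (by omega), pvUpdNe G k p (4*M-1-i) (by omega), hri]
    · rename_i hri
      rw [pvUpdNe G k p i (by omega), pvUpdNe G k p (2*M-1-i) (by omega),
          pvUpdNe G k p (2*M+i) (by omega), pvUpdNe G k p (4*M-1-i) (by omega)]
  · -- q = 1: row = M - 1 - r, k = M + r
    split
    · rename_i hri
      rw [pvUpdNe G k p i (by omega), pvUpdEq G k p (2*M-1-i) (by omega),
          pvUpdNe G k p (2*M+i) (by omega), pvUpdNe G k p (4*M-1-i) (by omega), hri]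
    · rename_i hri
      rw [pvUpdNe G k p i (by omega), pvUpdNe G k p (2*M-1-i) (by omega),
          pvUpdNe G k p (2*M+i) (by omega), pvUpdNe G k p (4*M-1-i) (by omega)]
  · -- q = 2: row = r, k = 2M + r
    split
    · rename_i hri
      rw [pvUpdNe G k p i (by omega), pvUpdNe G k p (2*M-1-i) (by omega),
          pvUpdEq G k p (2*M+i) (by omega), pvUpdNe G k p (4*M-1-i) (by omega), hri]
    · rename_i hri
      rw [pvUpdNe G k p i (by omega), pvUpdNe G k p (2*M-1-i) (by omega),
          pvUpdNe G k p (2*M+i) (by omega), pvUpdNe G k p (4*M-1-i) (by omega)]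
  · -- q = 3: row = M - 1 - r, k = 3M + r
    split
    · rename_i hri
      rw [pvUpdNe G k p i (by omega), pvUpdNe G k p (2*M-1-i) (by omega),
          pvUpdNe G k p (2*M+i) (by omega), pvUpdEq G k p (4*M-1-i) (by omega), hri]
    · rename_i hri
      rw [pvUpdNe G k p i (by omega), pvUpdNe G k p (2*M-1-i) (by omega),
          pvUpdNe G k p (2*M+i) (by omega), pvUpdNe G k p (4*M-1-i) (by omega)]

-- the whole scatter loop, characterised: positions k..k+rest.length-1 get rest, others keep G
theorem pvScatter_eq (M : Nat) (hM : 0 < M) :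
    ∀ (rest : List (List (String × Option String))) (k : Nat)
      (G : Nat → List (String × Option String)), k + rest.length ≤ 4*M →
    pvScatterLoop (M : Int) rest (k : Int) (pvTbl M G)
      = pvTbl M (fun j => if h : k ≤ j ∧ j < k + rest.length then rest[j-k]'(by omega) else G j) := by
  intro rest
  induction rest with
  | nil =>
    intro k G _
    simp only [pvScatterLoop]
    congr 1
    funext j
    rw [dif_neg (by simp only [List.length_nil]; omega)]
  | cons p rest ih =>
    intro k G hlen
    simp only [pvScatterLoop]
    have hk : k < 4*M := by simp only [List.length_cons] at hlen; omega
    obtain ⟨q, r, hq, hr, hq4, hrm, hkd⟩ :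
        ∃ q r, k / M = q ∧ k % M = r ∧ q < 4 ∧ r < M ∧ M*q + r = k :=
      ⟨k/M, k%M, rfl, rfl, Nat.div_lt_of_lt_mul (by omega), Nat.mod_lt _ hM,
        Nat.div_add_mod k M⟩
    have hfd : PySem.Int.floordiv (k : Int) (M : Int) = ((q : Nat) : Int) := by
      rw [PySem.Int.floordiv_natCast, hq]
    have hmd : PySem.Int.mod (k : Int) (M : Int) = ((r : Nat) : Int) := by
      rw [PySem.Int.mod_natCast, hr]
    have hm2 : PySem.Int.mod ((q : Nat) : Int) 2 = ((q % 2 : Nat) : Int) := by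
      exact_mod_cast PySem.Int.mod_natCast q 2
    have hrowN : ((if PySem.Int.mod (PySem.Int.floordiv (k : Int) (M : Int)) 2 = 0
        then PySem.Int.mod (k : Int) (M : Int)
        else (M : Int) - 1 - PySem.Int.mod (k : Int) (M : Int))).toNat
        = (if (k / M) % 2 = 0 then k % M else M - 1 - k % M) := by
      rw [hfd, hmd, hm2, hq, hr]
      by_cases h : q % 2 = 0
      · rw [if_pos (show ((q % 2 : Nat) : Int) = 0 by omega), if_pos h]; omega
      · rw [if_neg (show ¬((q % 2 : Nat) : Int) = 0 by omega), if_neg h]; omega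
    have hqN : ((PySem.Int.floordiv (k : Int) (M : Int))).toNat = k / M := by
      rw [hfd, hq]; omega
    rw [hrowN, hqN, pvStep M hM G k hk p,
      show ((k : Int) + 1) = (((k+1 : Nat)) : Int) from by omega,
      ih (k+1) (Function.update G k p) (by simp only [List.length_cons] at hlen; omega)]
    congr 1
    funext j
    by_cases h1 : j = k
    · subst h1
      rw [dif_neg (by omega), dif_pos (by simp only [List.length_cons]; omega),
        Function.update_self]
      simp
    · by_cases h2 : k + 1 ≤ j ∧ j < k + 1 + rest.length
      · rw [dif_pos h2, dif_pos (by simp only [List.length_cons]; omega)]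
        have : j - k = (j - (k+1)) + 1 := by omega
        simp only [this, List.getElem_cons_succ]
      · rw [dif_neg h2, dif_neg (by simp only [List.length_cons]; omega),
          Function.update_apply, if_neg h1]

-- the padded list of A, element-wise
theorem pvPad_get (players : List (List (String × Option String))) (M : Nat)
    (_hlen : players.length ≤ 4*M) (j : Nat)
    (hj : j < (players ++ List.replicate (4*M - players.length) pvBye).length) :
    (players ++ List.replicate (4*M - players.length) pvBye)[j]
      = if h : j < players.length then players[j] else pvBye := by
  by_cases h : j < players.length
  · rw [dif_pos h, List.getElem_append_left h]
  · rw [dif_neg h, List.getElem_append_right (by omega)]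
    simp

-- ===== VERDICT (by name: the statement is the Claim_ definition above) =====
theorem create_serpentine_matches_spec : Claim_equal_create_serpentine_matches := by
  intro players _ _
  unfold Spec_create_serpentine_matches create_serpentine_matches create_serpentine_matches_alt
  simp only []
  by_cases h : (players.length : Int) = 0
  · simp [h]
  · rw [if_neg h, if_neg h]
    have hm : PySem.Int.floordiv ((players.length : Int) + 3) 4
        = (((players.length + 3) / 4 : Nat) : Int) := by
      rw [PySem.Int.floordiv_eq_ediv_of_pos (by omega)]; omega
    rw [hm]
    set M : Nat := (players.length + 3) / 4 with hM
    have hM0 : 0 < M := by omega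
    have hle : players.length ≤ 4*M := by omega
    have hrep : (((M : Int) * 4 - (players.length : Int))).toNat = 4*M - players.length := by
      omega
    rw [hrep]
    set padded := players ++ List.replicate (4*M - players.length) pvBye with hpad
    have hplen : padded.length = 4*M := by simp [hpad]; omega
    -- B side: initial table is the abstract all-BYE table, then the scatter characterisation
    have htbl0 : (PySem.List.pyRange 0 (M : Int) 1).map
        (fun _ => [pvBye, pvBye, pvBye, pvBye]) = pvTbl M (fun _ => pvBye) := by
      rw [PySem.List.pyRange_one, show (((M : Int) - 0)).toNat = M from by omega]
      simp [pvTbl, Function.comp_def]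
    have hscat := pvScatter_eq M hM0 players 0 (fun _ => pvBye) (by omega)
    simp only [Nat.cast_zero, Nat.zero_add, Nat.zero_le, Nat.sub_zero, true_and] at hscat
    rw [htbl0, hscat]
    -- A side: the foldl as a map over range M
    rw [PySem.List.foldl_append_singleton_eq_map, PySem.List.pyRange_one, List.map_map,
      show (((M : Int) - 0)).toNat = M from by omega, List.nil_append]
    unfold pvTbl
    rw [List.map_map]
    apply List.map_congr_left
    intro i hi
    have hiM : i < M := List.mem_range.mp hi
    simp only [Function.comp_apply]
    have g : ∀ (z : Int), 0 ≤ z → z < (4*M : Int) →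
        PySem.List.pyGetD padded z pvBye
          = (if h : z.toNat < players.length then players[z.toNat] else pvBye) := by
      intro z h0 h4
      rw [PySem.List.pyGetD_eq_getElem padded pvBye h0 (by rw [hplen]; exact_mod_cast h4)]
      exact pvPad_get players M hle z.toNat (by rw [hplen] at *; omega)
    rw [g (0 + (i : Int)) (by omega) (by omega),
        g ((M : Int) * 2 - 1 - (0 + (i : Int))) (by omega) (by omega),
        g ((M : Int) * 2 + (0 + (i : Int))) (by omega) (by omega),
        g ((M : Int) * 4 - 1 - (0 + (i : Int))) (by omega) (by omega)]
    have e1 : ((0 : Int) + (i : Int)).toNat = i := by omega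
    have e2 : (((M : Int) * 2 - 1 - (0 + (i : Int)))).toNat = 2*M-1-i := by omega
    have e3 : (((M : Int) * 2 + (0 + (i : Int)))).toNat = 2*M+i := by omega
    have e4 : (((M : Int) * 4 - 1 - (0 + (i : Int)))).toNat = 4*M-1-i := by omega
    rw [e1, e2, e3, e4]
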